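-- pv_equiv track=rewrite | github.com/the-omega-institute/automath | theory/2026_golden_ratio_driven_scan_projection_generation_recursive_emergence/scripts/exp_replica_softcore_binary_necklace_trace_audit.py | tau_by_blocks
-- ===== SOURCE A (Python) =====
-- from typing import Dict, Iterable, List, Sequence, Tuple
--
-- def lucas_from_fib(F: Sequence[int], n: int) -> int:
--     """Lucas L_n from Fibonacci table with F_0=0, F_1=1."""
--     if n < 0:
--         raise ValueError("n must be >= 0")
--     if n == 0:
--         return 2
--     if n == 1:
--         return 1
--     # L_n = F_{n-1} + F_{n+1}
--     return F[n - 1] + F[n + 1]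
--
-- def tau_by_blocks(word: int, m: int, F: Sequence[int]) -> int:
--     """Compute tau from the zero-block decomposition between 1s."""
--     bits = [((word >> t) & 1) for t in range(m)]
--     ones = [i for i, b in enumerate(bits) if b == 1]
--     if not ones:
--         return lucas_from_fib(F, m)
--
--     s = len(ones)
--     prod = 1
--     for idx in range(s):
--         a = ones[idx]
--         b = ones[(idx + 1) % s]
--         if idx == s - 1:
--             b += m
--         r = b - a - 1
--         prod *= F[r + 3]
--     return prod
-- ===== SOURCE B (Python) =====
-- def tau_by_blocks(word: int, m: int, F) -> int:
--     """Single left-to-right scan: run-length of zeros between 1s, wrap block at the end."""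
--     prod = 1
--     run = 0
--     first = -1
--     last = -1
--     for t in range(m):
--         if (word >> t) & 1:
--             if first < 0:
--                 first = t
--             else:
--                 prod *= F[run + 3]
--             last = t
--             run = 0
--         else:
--             run += 1
--     if first < 0:
--         # no ones: Lucas number L_m from the Fibonacci table
--         if m == 0:
--             return 2
--         if m == 1:
--             return 1
--         return F[m - 1] + F[m + 1]
--     return prod * F[(m - 1 - last + first) + 3]
-- ===== Notes on version B (the rewrite author's own statement) =====
-- stated objective: alternative
-- what changed: B replaces A's explicit bits list, ones-index list and modular-indexed pair loop by a single left-to-right scan that maintains the current zero-run length and the first/last one positions, multiplying in F[run+3] at each subsequent 1 and closing the cyclic wrap block after the scan.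
import Mathlib
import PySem

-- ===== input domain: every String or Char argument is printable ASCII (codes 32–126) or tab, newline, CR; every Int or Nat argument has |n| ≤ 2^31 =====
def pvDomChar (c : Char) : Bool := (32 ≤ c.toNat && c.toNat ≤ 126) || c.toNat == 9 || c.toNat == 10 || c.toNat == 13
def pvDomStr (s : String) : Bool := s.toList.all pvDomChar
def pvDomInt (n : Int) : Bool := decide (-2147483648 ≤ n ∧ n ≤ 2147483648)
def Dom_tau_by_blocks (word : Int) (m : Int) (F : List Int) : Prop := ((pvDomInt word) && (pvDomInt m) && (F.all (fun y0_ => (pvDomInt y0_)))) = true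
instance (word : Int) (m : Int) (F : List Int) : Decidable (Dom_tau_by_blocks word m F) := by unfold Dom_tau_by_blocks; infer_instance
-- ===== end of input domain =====

-- B replaces A's ones-index list and modular-indexed pair loop by a single scan that
-- keeps the current zero-run length (objective: alternative decomposition, same O(m) cost).

-- shared literal helper: Python's `(word >> t) & 1` (appears verbatim in both programs)
def pvBit (word : Int) (t : Nat) : Int := PySem.Int.band (word >>> t) 1

-- ===== PORT A =====
-- A's helper lucas_from_fib; `raise ValueError` (n < 0) and an out-of-range F[...] (IndexError)
-- are excluded by Pre_, the port returns the default 0 there.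
def pvLucasFromFib (F : List Int) (n : Int) : Int :=
  if n < 0 then 0
  else if n = 0 then 2
  else if n = 1 then 1
  else PySem.List.pyGetD F (n - 1) 0 + PySem.List.pyGetD F (n + 1) 0

def tau_by_blocks (word : Int) (m : Int) (F : List Int) : Int :=
  let bits := (PySem.List.pyRange 0 m 1).map (fun t => pvBit word t.toNat)
  let ones := ((PySem.List.enumerate bits 0).filter (fun p => p.2 == 1)).map (fun p => p.1)
  if ones = [] then pvLucasFromFib F m
  else
    let s : Int := ones.length
    (PySem.List.pyRange 0 s 1).foldl (fun prod idx =>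
      let a := PySem.List.pyGetD ones idx 0
      let b0 := PySem.List.pyGetD ones (PySem.Int.mod (idx + 1) s) 0
      let b := if idx = s - 1 then b0 + m else b0
      prod * PySem.List.pyGetD F (b - a - 1 + 3) 0) 1

-- ===== PORT B =====
def tau_by_blocks_alt (word : Int) (m : Int) (F : List Int) : Int :=
  let st := (PySem.List.pyRange 0 m 1).foldl
    (fun (st : Int × Int × Int × Int) t =>
      let (prod, run, first, last) := st
      if pvBit word t.toNat ≠ 0 then
        if first < 0 then (prod, 0, t, t)
        else (prod * PySem.List.pyGetD F (run + 3) 0, 0, first, t)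
      else (prod, run + 1, first, last))
    (1, 0, -1, -1)
  let (prod, _, first, last) := st
  if first < 0 then
    if m = 0 then 2
    else if m = 1 then 1
    else PySem.List.pyGetD F (m - 1) 0 + PySem.List.pyGetD F (m + 1) 0
  else prod * PySem.List.pyGetD F (m - 1 - last + first + 3) 0

-- ===== PRECONDITION & SPEC =====
-- Pre_ excludes EXACTLY the inputs on which A raises: m < 0 (ValueError in lucas_from_fib)
-- and F too short for an F[...] access (IndexError).  With no set bit, A reads F[m-1] and
-- F[m+1] (only for m ≥ 2); with set bits, every cyclic zero-run r needs r+3 < len(F),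
-- which holds iff every cyclic window of len(F)-3 consecutive bit positions contains a 1.
-- Every input on which A returns is admitted.
def Pre_tau_by_blocks (word : Int) (m : Int) (F : List Int) : Prop :=
  0 ≤ m ∧
  (if ∀ t < m.toNat, pvBit word t ≠ 1 then (m ≤ 1 ∨ m + 2 ≤ F.length)
   else ∀ i < m.toNat, ∃ j < F.length - 3, pvBit word ((i + j) % m.toNat) = 1)
instance (word : Int) (m : Int) (F : List Int) : Decidable (Pre_tau_by_blocks word m F) := by
  unfold Pre_tau_by_blocks; infer_instance

def pvWitness_tau_by_blocks : Int × Int × List Int := (1, 2, [0, 1, 1, 2, 3])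

def Spec_tau_by_blocks (word : Int) (m : Int) (F : List Int) (out : Int) : Prop := out = tau_by_blocks_alt word m F
instance (word : Int) (m : Int) (F : List Int) (out : Int) : Decidable (Spec_tau_by_blocks word m F out) := by unfold Spec_tau_by_blocks; infer_instance

-- ===== CLAIM (what is proved, stated in full; the proofs are below) =====
def Claim_equal_tau_by_blocks : Prop := ∀ (word : Int) (m : Int) (F : List Int), Dom_tau_by_blocks word m F → Pre_tau_by_blocks word m F → Spec_tau_by_blocks word m F (tau_by_blocks word m F)

-- ===== LEMMAS AND PROOFS =====

-- the list of positions (as Ints) of set bits among the low n bits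
def pvOnes (word : Int) (n : Nat) : List Int :=
  (List.range n).filterMap (fun t => if pvBit word t = 1 then some ((t : Int)) else none)

-- accumulator form of the product over adjacent pairs of the ones list
def pvPP (F : List Int) (acc : Int) : List Int → Int
  | a :: b :: rest => pvPP F (acc * PySem.List.pyGetD F (b - a - 1 + 3) 0) (b :: rest)
  | _ => acc

theorem pvBit_cases (word : Int) (t : Nat) : pvBit word t = 0 ∨ pvBit word t = 1 := by
  have h := PySem.Int.band_one (word >>> t)
  have h1 := PySem.Int.mod_nonneg (word >>> t) (b := 2) (by omega)
  have h2 := PySem.Int.mod_lt (word >>> t) (b := 2) (by omega)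
  unfold pvBit
  omega

theorem pvOnes_succ (word : Int) (n : Nat) :
    pvOnes word (n + 1) = pvOnes word n ++ (if pvBit word n = 1 then [(n : Int)] else []) := by
  unfold pvOnes
  rw [List.range_succ, List.filterMap_append]
  congr 1
  by_cases h : pvBit word n = 1 <;> simp [h]

theorem pvOnes_mem_nonneg (word : Int) (n : Nat) {x : Int} (hx : x ∈ pvOnes word n) : 0 ≤ x := by
  unfold pvOnes at hx
  rw [List.mem_filterMap] at hx
  obtain ⟨t, -, ht⟩ := hx
  by_cases h : pvBit word t = 1 <;> simp [h] at ht
  omega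

theorem pvPP_snoc (F : List Int) (acc x : Int) (O : List Int) (h : O ≠ []) :
    pvPP F acc (O ++ [x]) = pvPP F acc O * PySem.List.pyGetD F (x - O.getLastD 0 - 1 + 3) 0 := by
  induction O generalizing acc with
  | nil => exact absurd rfl h
  | cons a rest ih =>
    cases rest with
    | nil => simp [pvPP]
    | cons b rest' => simpa [pvPP] using ih (acc * PySem.List.pyGetD F (b - a - 1 + 3) 0) (by simp)

-- A's ones-list construction equals pvOnes
theorem pvOnesA (word : Int) (n : Nat) :
    ((PySem.List.enumerate ((List.range n).map (fun t => pvBit word t)) 0).filter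
        (fun p => p.2 == 1)).map (fun p => p.1) = pvOnes word n := by
  induction n with
  | zero => simp [pvOnes]
  | succ n ih =>
    rw [List.range_succ, List.map_append, PySem.List.enumerate_append,
        List.filter_append, List.map_append, ih, pvOnes_succ]
    congr 1
    rcases pvBit_cases word n with h | h <;>
      simp [PySem.List.enumerate, h]

-- A's inner loop from index k to s-1 computes the adjacent-pair product of the tail
theorem A_loop (F : List Int) (m : Int) (O : List Int) :
    ∀ (d k : Nat) (acc : Int), k + d + 1 = O.length →
      (PySem.List.pyRange (k : Int) ((O.length : Int) - 1) 1).foldl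
        (fun prod idx =>
          prod * PySem.List.pyGetD F
            ((if idx = (O.length : Int) - 1 then
                PySem.List.pyGetD O (PySem.Int.mod (idx + 1) (O.length : Int)) 0 + m
              else PySem.List.pyGetD O (PySem.Int.mod (idx + 1) (O.length : Int)) 0)
              - PySem.List.pyGetD O idx 0 - 1 + 3) 0) acc
        = pvPP F acc (O.drop k) := by
  intro d
  induction d with
  | zero =>
    intro k acc hk
    have h1 : ((O.length : Int) - 1) = (k : Int) := by omega
    rw [h1, PySem.List.pyRange_one_eq_nil le_rfl]
    obtain ⟨a, ha⟩ : ∃ a, O.drop k = [a] := by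
      rw [← List.length_eq_one_iff]
      rw [List.length_drop]; omega
    rw [ha]; simp [pvPP]
  | succ d ih =>
    intro k acc hk
    have hkd : k + 1 + d + 1 = O.length := by omega
    have hlt : (k : Int) < (O.length : Int) - 1 := by omega
    rw [PySem.List.pyRange_one_cons hlt, List.foldl_cons]
    have hne : ((k : Int)) ≠ (O.length : Int) - 1 := by omega
    have hmod : PySem.Int.mod ((k : Int) + 1) (O.length : Int) = (k : Int) + 1 := by
      rw [PySem.Int.mod_eq_emod_of_pos (by omega)]
      exact Int.emod_eq_of_lt (by omega) (by omega)
    have hk1 : k + 1 < O.length := by omega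
    have hk0 : k < O.length := by omega
    have hg1 : PySem.List.pyGetD O ((k : Int) + 1) 0 = O[k + 1] := by
      have : ((k : Int) + 1) = ((k + 1 : Nat) : Int) := by push_cast; ring
      rw [this, PySem.List.pyGetD_natCast, List.getD_eq_getElem _ _ hk1]
    have hg0 : PySem.List.pyGetD O ((k : Int)) 0 = O[k] := by
      rw [PySem.List.pyGetD_natCast, List.getD_eq_getElem _ _ hk0]
    rw [if_neg hne, hmod, hg1, hg0]
    have h2 : ((k : Int) + 1) = ((k + 1 : Nat) : Int) := by push_cast; ring
    rw [h2, ih (k + 1) _ hkd]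
    have hdk1 : O.drop (k + 1) = O[k + 1] :: O.drop (k + 2) := (List.getElem_cons_drop hk1).symm
    have hdk : O.drop k = O[k] :: O[k + 1] :: O.drop (k + 2) := by
      rw [← List.getElem_cons_drop hk0, hdk1]
    rw [hdk1, hdk, pvPP]

-- B's scan state after n steps, in terms of pvOnes
theorem B_loop (word : Int) (F : List Int) (n : Nat) :
    (List.range n).foldl
      (fun (st : Int × Int × Int × Int) (k : Nat) =>
        (fun (st : Int × Int × Int × Int) (t : Int) =>
          let (prod, run, first, last) := st
          if pvBit word t.toNat ≠ 0 then
            if first < 0 then (prod, 0, t, t)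
            else (prod * PySem.List.pyGetD F (run + 3) 0, 0, first, t)
          else (prod, run + 1, first, last)) st (k : Int))
      (1, 0, -1, -1)
    = if pvOnes word n = [] then ((1 : Int), (n : Int), (-1 : Int), (-1 : Int))
      else (pvPP F 1 (pvOnes word n), (n : Int) - 1 - (pvOnes word n).getLastD 0,
            (pvOnes word n).headI, (pvOnes word n).getLastD 0) := by
  induction n with
  | zero => simp [pvOnes]
  | succ n ih =>
    rw [List.range_succ, List.foldl_append, ih, List.foldl_cons, List.foldl_nil,
        pvOnes_succ]
    rcases pvBit_cases word n with h | h
    · -- bit n is 0: the run grows, the ones list is unchanged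
      by_cases hO : pvOnes word n = []
      · simp only [hO, reduceIte, h, List.nil_append]
        simp [h]
      · simp only [hO, reduceIte, h]
        simp [h, hO, Prod.ext_iff]
        omega
    · -- bit n is 1
      by_cases hO : pvOnes word n = []
      · simp only [hO, reduceIte, h, List.nil_append]
        simp [h, pvPP]
      · obtain ⟨a, O', hcons⟩ := List.exists_cons_of_ne_nil hO
        have hh : (0 : Int) ≤ a := pvOnes_mem_nonneg word n (by rw [hcons]; exact List.mem_cons_self)
        have hsnoc := pvPP_snoc F 1 ((n : Int)) (a :: O') (by simp)
        simp only [List.cons_append, List.getLastD_eq_getLast?] at hsnoc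
        have hgl : (a :: (O' ++ [(n : Int)])).getLast?.getD 0 = (n : Int) := by
          rw [← List.cons_append, List.getLast?_concat]
          rfl
        have hidx : ((n : Int) - 1 - (a :: O').getLast?.getD 0 + 3)
            = ((n : Int) - (a :: O').getLast?.getD 0 - 1 + 3) := by ring
        rw [hcons]
        simp [h, not_lt.mpr hh, hsnoc, hgl, hidx]

-- A's whole loop over the ones indices: pair product times the cyclic wrap factor
theorem A_top (F : List Int) (m : Int) (O : List Int) (hO : O ≠ []) :
    (PySem.List.pyRange 0 (O.length : Int) 1).foldl
      (fun prod idx =>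
        prod * PySem.List.pyGetD F
          ((if idx = (O.length : Int) - 1 then
              PySem.List.pyGetD O (PySem.Int.mod (idx + 1) (O.length : Int)) 0 + m
            else PySem.List.pyGetD O (PySem.Int.mod (idx + 1) (O.length : Int)) 0)
            - PySem.List.pyGetD O idx 0 - 1 + 3) 0) 1
    = pvPP F 1 O * PySem.List.pyGetD F (O.headI + m - O.getLastD 0 - 1 + 3) 0 := by
  have hlen : 0 < O.length := List.length_pos_of_ne_nil hO
  have hsplit : PySem.List.pyRange 0 ((O.length : Int)) 1
      = PySem.List.pyRange 0 ((O.length : Int) - 1) 1 ++ [(O.length : Int) - 1] := by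
    have h := PySem.List.pyRange_one_succ_right (a := 0) (b := (O.length : Int) - 1) (by omega)
    rw [sub_add_cancel] at h
    exact h
  have hA := A_loop F m O (O.length - 1) 0 1 (by omega)
  simp only [Nat.cast_zero, List.drop_zero] at hA
  rw [hsplit, List.foldl_append, hA]
  simp only [List.foldl_cons, List.foldl_nil]
  simp only [if_true]
  have hmodss : PySem.Int.mod ((O.length : Int) - 1 + 1) (O.length : Int) = 0 := by
    rw [sub_add_cancel]
    exact (PySem.Int.mod_eq_zero_iff_dvd _ _).mpr dvd_rfl
  rw [hmodss]
  have hzero : PySem.List.pyGetD O 0 0 = O.headI := by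
    cases O with
    | nil => exact absurd rfl hO
    | cons x xs => simp [PySem.List.pyGetD_zero]
  have hlast : PySem.List.pyGetD O ((O.length : Int) - 1) 0 = O.getLastD 0 := by
    have h1 : ((O.length : Int) - 1) = ((O.length - 1 : Nat) : Int) := by omega
    rw [h1, PySem.List.pyGetD_natCast, List.getD_eq_getElem?_getD,
        List.getLastD_eq_getLast?, List.getLast?_eq_getElem?]
  rw [hzero, hlast]

theorem tau_eq_aux (word m : Int) (F : List Int) (hm : 0 ≤ m) :
    tau_by_blocks word m F = tau_by_blocks_alt word m F := by
  obtain ⟨n, rfl⟩ : ∃ n : Nat, m = (n : Int) := ⟨m.toNat, (Int.toNat_of_nonneg hm).symm⟩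
  simp only [tau_by_blocks, tau_by_blocks_alt]
  have hrange : PySem.List.pyRange 0 (n : Int) 1 = (List.range n).map (Nat.cast : Nat → Int) := by
    apply List.ext_getElem
    · simp [PySem.List.length_pyRange_one]
    · intro i h1 h2
      simp [PySem.List.getElem_pyRange_one]
  rw [hrange]
  simp only [List.map_map, Function.comp_def, Int.toNat_natCast]
  rw [pvOnesA word n, List.foldl_map, B_loop word F n]
  by_cases hO : pvOnes word n = []
  · rw [if_pos hO, if_pos hO]
    unfold pvLucasFromFib
    rw [if_neg (by omega : ¬ (n : Int) < 0)]
    simp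
  · rw [if_neg hO, if_neg hO, A_top F (n : Int) (pvOnes word n) hO]
    have hh : (0 : Int) ≤ (pvOnes word n).headI := by
      obtain ⟨a, O', hcons⟩ := List.exists_cons_of_ne_nil hO
      rw [hcons]
      exact pvOnes_mem_nonneg word n (by rw [hcons]; exact List.mem_cons_self)
    simp only [not_lt.mpr hh, if_false]
    congr 1
    congr 1
    ring

theorem tau_by_blocks_spec : Claim_equal_tau_by_blocks := by
  intro word m F _ hpre
  unfold Pre_tau_by_blocks at hpre
  unfold Spec_tau_by_blocks
  exact tau_eq_aux word m F hpre.1
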